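-- pv_equiv track=rewrite | github.com/gavrisraul/UBB-Mathematics-Computer-Science-English | Semester1/Algorithms and Programming/Seminars/Seminar03/Problem01.py | DeleteFromList
-- ===== SOURCE A (Python) =====
-- def isPowerOfTwo(x):
--     while x%2 == 0:
--         x//=2
--     if x==1:
--         return True
--     return False
--
-- def DeleteFromList(myLst):
--     indexes = []
--     for i in range(len(myLst)):
--         if isPowerOfTwo(myLst[i]):
--             indexes.append(i)
--     for x in reversed(indexes):
--         del myLst[x]
--     return myLst
-- ===== SOURCE B (Python) =====
-- def isPowerOfTwo(x):
--     while x%2 == 0: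
--         x//=2
--     if x==1:
--         return True
--     return False
--
-- def DeleteFromList(myLst):
--     k = 0
--     for i in range(len(myLst)):
--         if not isPowerOfTwo(myLst[i]):
--             myLst[k] = myLst[i]
--             k += 1
--     del myLst[k:]
--     return myLst
-- ===== Notes on version B (the rewrite author's own statement) =====
-- stated objective: alternative
-- what changed: Replaces A's two-pass collect-indices-then-delete-in-reverse (each del shifts the tail) with a single-pass in-place compaction using a write pointer and one final truncation; both mutate the list in place and return it.
import Mathlib
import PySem

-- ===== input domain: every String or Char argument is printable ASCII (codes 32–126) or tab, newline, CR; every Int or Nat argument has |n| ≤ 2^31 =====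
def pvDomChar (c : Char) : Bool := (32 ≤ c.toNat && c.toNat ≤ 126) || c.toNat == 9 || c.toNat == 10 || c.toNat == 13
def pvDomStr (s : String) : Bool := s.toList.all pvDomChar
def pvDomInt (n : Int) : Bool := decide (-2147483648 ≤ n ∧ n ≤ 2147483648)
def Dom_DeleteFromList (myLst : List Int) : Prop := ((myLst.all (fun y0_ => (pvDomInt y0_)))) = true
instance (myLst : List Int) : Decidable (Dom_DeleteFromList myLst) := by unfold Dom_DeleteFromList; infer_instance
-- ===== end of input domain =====

-- B replaces A's collect-indices-then-delete-in-reverse with a one-pass write-pointer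
-- compaction plus one truncation (alternative decomposition; both Pythons mutate the
-- argument list in place and return it — the theorems here are about the return value).

-- ===== PORT A =====
-- isPowerOfTwo: the Python while-loop, made total with fuel x.natAbs (enough for every
-- x ≠ 0; on x = 0 the Python loop never returns, in A and B alike).
def powLoopA : Nat → Int → Int
  | 0, x => x
  | n+1, x => if PySem.Int.mod x 2 = 0 then powLoopA n (PySem.Int.floordiv x 2) else x

def isPowerOfTwo (x : Int) : Bool := powLoopA x.natAbs x == 1

def DeleteFromList (myLst : List Int) : List Int :=
  let indexes := (PySem.List.pyRange 0 (myLst.length : Int) 1).foldl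
    (fun acc i => if isPowerOfTwo (PySem.List.pyGetD myLst i 0) then acc ++ [i] else acc) []
  indexes.reverse.foldl (fun l x => l.eraseIdx x.toNat) myLst

-- ===== PORT B =====
def DeleteFromList_alt (myLst : List Int) : List Int :=
  let st := (PySem.List.pyRange 0 (myLst.length : Int) 1).foldl
    (fun (st : List Int × Int) i =>
      let v := PySem.List.pyGetD st.1 i 0
      if !isPowerOfTwo v then (st.1.set st.2.toNat v, st.2 + 1) else st)
    (myLst, 0)
  st.1.take st.2.toNat

-- ===== PRECONDITION & SPEC =====
def Spec_DeleteFromList (myLst : List Int) (out : List Int) : Prop := out = DeleteFromList_alt myLst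
instance (myLst : List Int) (out : List Int) : Decidable (Spec_DeleteFromList myLst out) := by unfold Spec_DeleteFromList; infer_instance

-- ===== CLAIM (what is proved, stated in full; the proofs are below) =====
def Claim_equal_DeleteFromList : Prop := ∀ (myLst : List Int), Dom_DeleteFromList myLst → Spec_DeleteFromList myLst (DeleteFromList myLst)

-- ===== LEMMAS AND PROOFS =====

-- abbreviation for the predicate both programs share
def q (v : Int) : Bool := !isPowerOfTwo v

-- the Nat-side index list A collects
def idxP (lst : List Int) : List Nat :=
  (List.range lst.length).filter (fun i => isPowerOfTwo (lst.getD i 0))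

lemma idxP_cons (a : Int) (l : List Int) :
    idxP (a :: l) = (if isPowerOfTwo a then [0] else []) ++ (idxP l).map (· + 1) := by
  unfold idxP
  simp only [List.length_cons, List.range_succ_eq_map, List.filter_cons, List.getD_cons_zero,
    List.filter_map]
  split <;> simp [Function.comp_def]

lemma foldl_erase_map_succ (m : List Nat) (a : Int) (t : List Int) :
    (m.map (· + 1)).foldl (fun s x => s.eraseIdx x) (a :: t)
      = a :: m.foldl (fun s x => s.eraseIdx x) t := by
  induction m generalizing t with
  | nil => simp
  | cons x m ih => simp [List.eraseIdx_cons_succ, ih]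

-- A's delete-in-reverse loop equals filter
lemma eraseRev_eq_filter (l : List Int) :
    (idxP l).reverse.foldl (fun s x => s.eraseIdx x) l = l.filter q := by
  induction l with
  | nil => simp [idxP]
  | cons a l ih =>
    rw [idxP_cons, List.reverse_append, List.foldl_append, ← List.map_reverse,
      foldl_erase_map_succ, ih]
    by_cases h : isPowerOfTwo a <;> simp [h, q]

-- A's port equals filter
lemma portA_eq_filter (lst : List Int) : DeleteFromList lst = lst.filter q := by
  unfold DeleteFromList
  rw [PySem.List.pyRange_zero_nat,
      List.foldl_map, show (fun (acc : List Int) (k : Nat) =>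
        if isPowerOfTwo (PySem.List.pyGetD lst (↑k) 0) then acc ++ [(k : Int)] else acc)
        = fun acc k => if (fun i => isPowerOfTwo (lst.getD i 0)) k then acc ++ [((k : Int))] else acc
        from by funext acc k; simp [PySem.List.pyGetD_natCast],
      PySem.List.foldl_append_if (fun i => isPowerOfTwo (lst.getD i 0)) (fun k => (k : Int))]
  dsimp only
  rw [List.nil_append, ← List.map_reverse, List.foldl_map]
  simpa using eraseRev_eq_filter lst

lemma set_take_succ (l : List Int) (k : Nat) (v : Int) (h : k < l.length) :
    (l.set k v).take (k+1) = l.take k ++ [v] := by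
  rw [List.take_set, List.take_succ_eq_append_getElem h, List.set_append,
      if_neg (by simp [Nat.min_eq_left h.le]), List.length_take]
  simp [Nat.min_eq_left h.le]

-- B's loop invariant: after the first i steps the state is (t, k) with the survivors of
-- the first i elements compacted into t.take k and the unread suffix of t untouched
lemma portB_invariant (lst : List Int) (i : Nat) (hi : i ≤ lst.length) :
    ∃ (t : List Int) (k : Nat),
      (PySem.List.pyRange 0 (i : Int) 1).foldl
        (fun (st : List Int × Int) j =>
          let v := PySem.List.pyGetD st.1 j 0
          if !isPowerOfTwo v then (st.1.set st.2.toNat v, st.2 + 1) else st)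
        (lst, 0) = (t, (k : Int))
      ∧ k ≤ i ∧ t.length = lst.length
      ∧ t.take k = (lst.take i).filter q
      ∧ t.drop i = lst.drop i := by
  induction i with
  | zero =>
    refine ⟨lst, 0, ?_, by simp, rfl, by simp, rfl⟩
    simp
  | succ i ih =>
    obtain ⟨t, k, heq, hk, hlen, htake, hdrop⟩ := ih (Nat.le_of_succ_le hi)
    have hilt : i < lst.length := hi
    have hrange : PySem.List.pyRange 0 ((i+1 : Nat) : Int) 1
        = PySem.List.pyRange 0 (i : Int) 1 ++ [(i : Int)] := by
      push_cast
      exact PySem.List.pyRange_one_succ_right (by positivity)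
    have h1 : t[i]? = lst[i]? := by
      rw [← Nat.add_zero i, ← List.getElem?_drop, ← List.getElem?_drop, hdrop]
    have hg : lst.getD i 0 = lst[i] := by
      simp [List.getD_eq_getElem?_getD, List.getElem?_eq_getElem hilt]
    have hv : t[i]?.getD 0 = lst.getD i 0 := by
      rw [h1]; simp [List.getD_eq_getElem?_getD]
    have hdrop1 : t.drop (i+1) = lst.drop (i+1) := by
      have := congrArg (List.drop 1) hdrop
      simpa [List.drop_drop, Nat.add_comm] using this
    rw [hrange, List.foldl_append, heq]
    by_cases hq : isPowerOfTwo (lst.getD i 0)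
    · have hq2 : isPowerOfTwo lst[i] = true := hg ▸ hq
      refine ⟨t, k, ?_, by omega, hlen, ?_, hdrop1⟩
      · simp [hv, List.getElem?_eq_getElem hilt, hq2]
      · rw [htake, List.take_succ_eq_append_getElem hilt, List.filter_append]
        simp [q, hq2]
    · have hklt : k < t.length := by omega
      have hq2 : isPowerOfTwo lst[i] = false := by
        rw [← hg]; exact Bool.eq_false_iff.mpr hq
      refine ⟨t.set k (lst.getD i 0), k+1, ?_, by omega, by simp [hlen], ?_, ?_⟩
      · simp [hv, List.getElem?_eq_getElem hilt, hq2]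
      · rw [set_take_succ _ _ _ hklt, htake, List.take_succ_eq_append_getElem hilt,
            List.filter_append]
        simp [q, List.getElem?_eq_getElem hilt, hq2]
      · rw [List.drop_set, if_pos (by omega)]
        exact hdrop1

-- B's port equals filter
lemma portB_eq_filter (lst : List Int) : DeleteFromList_alt lst = lst.filter q := by
  obtain ⟨t, k, heq, hk, hlen, htake, hdrop⟩ :=
    portB_invariant lst lst.length (le_refl _)
  unfold DeleteFromList_alt
  rw [heq]
  simpa using htake

-- ===== VERDICT (by name: the statement is the Claim_ definition above) =====
theorem DeleteFromList_spec : Claim_equal_DeleteFromList := by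
  intro l _
  show DeleteFromList l = DeleteFromList_alt l
  rw [portA_eq_filter, portB_eq_filter]
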